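-- pv_equiv track=rewrite | github.com/mitchhit234/LeetCode | max_sum_min_product.py | maxSumMinProduct
-- ===== SOURCE A (Python) =====
-- def maxSumMinProduct(nums):
--   prefix = [nums[0]]
--   for i in range(1,len(nums)):
--     prefix.append(nums[i]+prefix[i-1])
--
--   mx = 0
--   for i in range(len(nums)):
--     l, r = get_lr_sum(nums,i)
--     sm = prefix[r]
--     if l >= 0:
--       sm -= prefix[l]
--     mx = max(mx,nums[i]*sm)
--
--   return mx
--
-- def get_lr_sum(N,i):
--   l, r = i-1, i+1
--   while l >= 0 and N[l] >= N[i]: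
--     l -= 1
--   while r < len(N) and N[r] >= N[i]:
--     r += 1
--
--   return l, r-1
-- ===== SOURCE B (Python) =====
-- def maxSumMinProduct(nums):
--   n = len(nums)
--   # previous strictly-smaller index (or -1) for each i, via a monotonic stack
--   left = []
--   stack = []
--   for i in range(n):
--     while stack and nums[stack[-1]] >= nums[i]:
--       stack.pop()
--     left.append(stack[-1] if stack else -1)
--     stack.append(i)
--   # next strictly-smaller index (or n) for each i, via a monotonic stack right-to-left
--   right_rev = []
--   stack = []
--   for i in range(n - 1, -1, -1):
--     while stack and nums[stack[-1]] >= nums[i]: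
--       stack.pop()
--     right_rev.append(stack[-1] if stack else n)
--     stack.append(i)
--   right = right_rev[::-1]
--   # prefix sums with a leading 0 sentinel
--   pre = [0]
--   for x in nums:
--     pre.append(pre[-1] + x)
--   best = 0
--   for i in range(n):
--     best = max(best, nums[i] * (pre[right[i]] - pre[left[i] + 1]))
--   return best
-- ===== Notes on version B (the rewrite author's own statement) =====
-- stated objective: faster
-- what changed: replaces the per-index linear expansion of get_lr_sum (quadratic overall) by two monotonic-stack passes that compute every previous/next strictly-smaller index in linear time, plus a sentinel prefix-sum array
import Mathlib
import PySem

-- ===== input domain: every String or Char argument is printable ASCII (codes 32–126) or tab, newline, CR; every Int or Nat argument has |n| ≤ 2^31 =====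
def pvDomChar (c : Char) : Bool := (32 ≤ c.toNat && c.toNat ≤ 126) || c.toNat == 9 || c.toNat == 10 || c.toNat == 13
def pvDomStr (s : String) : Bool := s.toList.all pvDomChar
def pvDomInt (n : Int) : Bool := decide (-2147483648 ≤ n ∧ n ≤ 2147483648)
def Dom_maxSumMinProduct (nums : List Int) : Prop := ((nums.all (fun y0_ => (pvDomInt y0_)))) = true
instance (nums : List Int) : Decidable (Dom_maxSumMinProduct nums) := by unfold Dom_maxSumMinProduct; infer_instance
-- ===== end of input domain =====

-- B replaces A's per-index window expansion (get_lr_sum) by two monotonic-stack passes that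
-- compute all previous/next strictly-smaller indices, plus a sentinel prefix-sum list (objective: faster).

-- ===== PORT A =====
-- first while loop of get_lr_sum: decrement l while l >= 0 and N[l] >= v
def scanL (N : List Int) (v : Int) (l : Int) : Int :=
  if h : 0 ≤ l ∧ v ≤ PySem.List.pyGetD N l 0 then scanL N v (l - 1) else l
termination_by (l + 1).toNat
decreasing_by obtain ⟨h1, -⟩ := h; omega

-- second while loop of get_lr_sum: increment r while r < len(N) and N[r] >= v
def scanR (N : List Int) (v : Int) (r : Int) : Int :=
  if h : r < (N.length : Int) ∧ v ≤ PySem.List.pyGetD N r 0 then scanR N v (r + 1) else r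
termination_by ((N.length : Int) - r).toNat
decreasing_by obtain ⟨h1, -⟩ := h; omega

def getLrSum (N : List Int) (i : Int) : Int × Int :=
  (scanL N (PySem.List.pyGetD N i 0) (i - 1),
   scanR N (PySem.List.pyGetD N i 0) (i + 1) - 1)

-- prefix = [nums[0]]; for i in range(1, len(nums)): prefix.append(nums[i] + prefix[i-1])
def buildPrefixA (nums : List Int) : List Int :=
  (PySem.List.pyRange 1 (PySem.List.len nums) 1).foldl
    (fun p i => p ++ [PySem.List.pyGetD nums i 0 + PySem.List.pyGetD p (i - 1) 0])
    [PySem.List.pyGetD nums 0 0]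

def maxSumMinProduct (nums : List Int) : Int :=
  let pre := buildPrefixA nums
  (PySem.List.pyRange 0 (PySem.List.len nums) 1).foldl
    (fun mx i =>
      let lr := getLrSum nums i
      let sm := PySem.List.pyGetD pre lr.2 0
      let sm := if 0 ≤ lr.1 then sm - PySem.List.pyGetD pre lr.1 0 else sm
      max mx (PySem.List.pyGetD nums i 0 * sm)) 0

-- ===== PORT B =====
-- while stack and nums[stack[-1]] >= v: stack.pop()   (list head = Python stack[-1])
def popW (N : List Int) (v : Int) : List Int → List Int
  | [] => []
  | j :: s => if v ≤ PySem.List.pyGetD N j 0 then popW N v s else j :: s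

-- one iteration of the left-to-right pass: state = (left list so far, stack)
def stepL (N : List Int) (st : List Int × List Int) (i : Int) : List Int × List Int :=
  let s := popW N (PySem.List.pyGetD N i 0) st.2
  (st.1 ++ [s.headD (-1)], i :: s)

-- one iteration of the right-to-left pass: state = (right_rev list so far, stack)
def stepR (N : List Int) (st : List Int × List Int) (i : Int) : List Int × List Int :=
  let s := popW N (PySem.List.pyGetD N i 0) st.2
  (st.1 ++ [s.headD (PySem.List.len N)], i :: s)

-- pre = [0]; for x in nums: pre.append(pre[-1] + x)
def buildPreB (nums : List Int) : List Int :=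
  nums.foldl (fun p x => p ++ [PySem.List.pyGetD p (-1) 0 + x]) [0]

def maxSumMinProduct_alt (nums : List Int) : Int :=
  let n := PySem.List.len nums
  let left := ((PySem.List.pyRange 0 n 1).foldl (stepL nums) ([], [])).1
  let right := (((PySem.List.pyRange (n - 1) (-1) (-1)).foldl (stepR nums) ([], [])).1).reverse
  let pre := buildPreB nums
  (PySem.List.pyRange 0 n 1).foldl
    (fun best i =>
      max best (PySem.List.pyGetD nums i 0 *
        (PySem.List.pyGetD pre (PySem.List.pyGetD right i 0) 0 -
         PySem.List.pyGetD pre (PySem.List.pyGetD left i 0 + 1) 0))) 0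

-- ===== PRECONDITION & SPEC =====
-- A reads the first element unconditionally, so it raises IndexError exactly on the empty list.
def Pre_maxSumMinProduct (nums : List Int) : Prop := nums ≠ []
instance (nums : List Int) : Decidable (Pre_maxSumMinProduct nums) := by
  unfold Pre_maxSumMinProduct; infer_instance

def pvWitness_maxSumMinProduct : List Int := [2, 3, 1, 2]

def Spec_maxSumMinProduct (nums : List Int) (out : Int) : Prop := out = maxSumMinProduct_alt nums
instance (nums : List Int) (out : Int) : Decidable (Spec_maxSumMinProduct nums out) := by
  unfold Spec_maxSumMinProduct; infer_instance

-- ===== CLAIM (what is proved, stated in full; the proofs are below) =====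
def Claim_equal_maxSumMinProduct : Prop :=
  ∀ (nums : List Int), Dom_maxSumMinProduct nums → Pre_maxSumMinProduct nums →
    Spec_maxSumMinProduct nums (maxSumMinProduct nums)

-- ===== LEMMAS AND PROOFS =====

theorem scanL_le (N : List Int) (v l : Int) : scanL N v l ≤ l := by
  fun_induction scanL N v l with
  | case1 l h ih => omega
  | case2 l h => omega

theorem scanL_ge (N : List Int) (v : Int) {l : Int} (h : -1 ≤ l) : -1 ≤ scanL N v l := by
  revert h
  fun_induction scanL N v l with
  | case1 l h1 ih => intro _; exact ih (by omega)
  | case2 l h1 => intro h; exact h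

theorem scanL_between (N : List Int) (v l : Int) :
    ∀ k, scanL N v l < k → k ≤ l → v ≤ PySem.List.pyGetD N k 0 := by
  fun_induction scanL N v l with
  | case1 l h ih =>
      intro k hk1 hk2
      by_cases hk : k ≤ l - 1
      · exact ih k hk1 hk
      · have : k = l := by omega
        subst this; exact h.2
  | case2 l h => intro k hk1 hk2; omega

theorem scanL_congr (N : List Int) (v : Int) {m : Int} (hm : -1 ≤ m) :
    ∀ {l : Int}, m ≤ l → (∀ k, m < k → k ≤ l → v ≤ PySem.List.pyGetD N k 0) →
      scanL N v l = scanL N v m := by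
  intro l hml
  induction l, hml using Int.le_induction with
  | base => intro _; rfl
  | succ l hml ih =>
      intro h
      have hv : v ≤ PySem.List.pyGetD N (l + 1) 0 := h (l + 1) (by omega) le_rfl
      rw [scanL, dif_pos ⟨by omega, hv⟩]
      simp only [add_sub_cancel_right]
      exact ih (fun k hk1 hk2 => h k hk1 (by omega))

theorem scanR_ge (N : List Int) (v r : Int) : r ≤ scanR N v r := by
  fun_induction scanR N v r with
  | case1 r h ih => omega
  | case2 r h => omega

theorem scanR_le (N : List Int) (v : Int) {r : Int} (h : r ≤ (N.length : Int)) :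
    scanR N v r ≤ (N.length : Int) := by
  revert h
  fun_induction scanR N v r with
  | case1 r h1 ih => intro _; exact ih (by omega)
  | case2 r h1 => intro h; exact h

theorem scanR_between (N : List Int) (v r : Int) :
    ∀ k, r ≤ k → k < scanR N v r → v ≤ PySem.List.pyGetD N k 0 := by
  fun_induction scanR N v r with
  | case1 r h ih =>
      intro k hk1 hk2
      by_cases hk : r + 1 ≤ k
      · exact ih k hk hk2
      · have : k = r := by omega
        subst this; exact h.2
  | case2 r h => intro k hk1 hk2; omega

theorem scanR_congr (N : List Int) (v : Int) {r : Int} :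
    ∀ {m : Int}, r ≤ m → m ≤ (N.length : Int) →
      (∀ k, r ≤ k → k < m → v ≤ PySem.List.pyGetD N k 0) →
      scanR N v r = scanR N v m := by
  intro m hrm
  induction m, hrm using Int.le_induction with
  | base => intro _ _; rfl
  | succ m hrm ih =>
      intro hlen h
      have hv : v ≤ PySem.List.pyGetD N m 0 := h m hrm (by omega)
      have hstep : scanR N v m = scanR N v (m + 1) := by
        conv_lhs => rw [scanR]
        rw [dif_pos ⟨by omega, hv⟩]
      rw [← hstep]
      exact ih (by omega) (fun k hk1 hk2 => h k hk1 (by omega))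

-- the stack after the left pass has processed 0..j is the chain of prev-smaller links from j
def chainL (N : List Int) (j : Int) : List Int :=
  if h : 0 ≤ j then j :: chainL N (scanL N (PySem.List.pyGetD N j 0) (j - 1)) else []
termination_by (j + 1).toNat
decreasing_by have := scanL_le N (PySem.List.pyGetD N j 0) (j - 1); omega

-- the stack after the right pass has processed j..n-1 is the chain of next-smaller links from j
def chainR (N : List Int) (j : Int) : List Int :=
  if h : j < (N.length : Int) then j :: chainR N (scanR N (PySem.List.pyGetD N j 0) (j + 1)) else []
termination_by ((N.length : Int) - j).toNat
decreasing_by have := scanR_ge N (PySem.List.pyGetD N j 0) (j + 1); omega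

theorem chainL_headD (N : List Int) {j : Int} (h : -1 ≤ j) : (chainL N j).headD (-1) = j := by
  rw [chainL]
  by_cases hj : 0 ≤ j
  · rw [dif_pos hj]; rfl
  · rw [dif_neg hj]; simp; omega

theorem chainR_headD (N : List Int) {j : Int} (h : j ≤ (N.length : Int)) :
    (chainR N j).headD (N.length : Int) = j := by
  rw [chainR]
  by_cases hj : j < (N.length : Int)
  · rw [dif_pos hj]; rfl
  · rw [dif_neg hj]; simp; omega

theorem popW_chainL (N : List Int) (v : Int) {j : Int} (h : -1 ≤ j) :
    popW N v (chainL N j) = chainL N (scanL N v j) := by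
  by_cases hj : 0 ≤ j
  · rw [chainL, dif_pos hj]
    by_cases hv : v ≤ PySem.List.pyGetD N j 0
    · have hLge : -1 ≤ scanL N (PySem.List.pyGetD N j 0) (j - 1) := scanL_ge N _ (by omega)
      have hLle : scanL N (PySem.List.pyGetD N j 0) (j - 1) ≤ j - 1 := scanL_le N _ _
      have h1 : scanL N v j = scanL N v (scanL N (PySem.List.pyGetD N j 0) (j - 1)) := by
        conv_lhs => rw [scanL]
        rw [dif_pos ⟨hj, hv⟩]
        exact scanL_congr N v hLge hLle
          (fun k hk1 hk2 => le_trans hv (scanL_between N _ (j - 1) k hk1 hk2))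
      rw [h1, popW, if_pos hv]
      exact popW_chainL N v hLge
    · have h1 : scanL N v j = j := by rw [scanL, dif_neg (by tauto)]
      rw [h1, popW, if_neg hv]
      conv_rhs => rw [chainL, dif_pos hj]
  · have hj1 : j = -1 := by omega
    subst hj1
    have h1 : scanL N v (-1) = -1 := by rw [scanL, dif_neg (by norm_num)]
    rw [h1, chainL, dif_neg (by norm_num)]; rfl
termination_by (j + 1).toNat
decreasing_by omega

theorem popW_chainR (N : List Int) (v : Int) {j : Int} (h : -1 ≤ j) :
    popW N v (chainR N j) = chainR N (scanR N v j) := by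
  by_cases hj : j < (N.length : Int)
  · rw [chainR, dif_pos hj]
    by_cases hv : v ≤ PySem.List.pyGetD N j 0
    · have hRge : j + 1 ≤ scanR N (PySem.List.pyGetD N j 0) (j + 1) := scanR_ge N _ _
      have hRle : scanR N (PySem.List.pyGetD N j 0) (j + 1) ≤ (N.length : Int) :=
        scanR_le N _ (by omega)
      have h1 : scanR N v j = scanR N v (scanR N (PySem.List.pyGetD N j 0) (j + 1)) := by
        conv_lhs => rw [scanR]
        rw [dif_pos ⟨hj, hv⟩]
        exact scanR_congr N v hRge hRle
          (fun k hk1 hk2 => le_trans hv (scanR_between N _ (j + 1) k hk1 hk2))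
      rw [h1, popW, if_pos hv]
      exact popW_chainR N v (by omega)
    · have h1 : scanR N v j = j := by rw [scanR, dif_neg (by tauto)]
      rw [h1, popW, if_neg hv]
      conv_rhs => rw [chainR, dif_pos hj]
  · have h1 : scanR N v j = j := by rw [scanR, dif_neg (by tauto)]
    rw [h1, chainR, dif_neg hj]; rfl
termination_by ((N.length : Int) - j).toNat
decreasing_by omega

theorem leftFold (N : List Int) (a : Int) (acc : List Int) (h0 : 0 ≤ a)
    (h1 : a ≤ (N.length : Int)) :
    (PySem.List.pyRange a (N.length : Int) 1).foldl (stepL N) (acc, chainL N (a - 1)) =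
      (acc ++ (PySem.List.pyRange a (N.length : Int) 1).map
          (fun i => scanL N (PySem.List.pyGetD N i 0) (i - 1)),
       chainL N ((N.length : Int) - 1)) := by
  by_cases ha : a < (N.length : Int)
  · rw [PySem.List.pyRange_one_cons ha]
    simp only [List.foldl_cons, List.map_cons]
    have hLge : -1 ≤ scanL N (PySem.List.pyGetD N a 0) (a - 1) := scanL_ge N _ (by omega)
    have hst : stepL N (acc, chainL N (a - 1)) a =
        (acc ++ [scanL N (PySem.List.pyGetD N a 0) (a - 1)], chainL N ((a + 1) - 1)) := by
      simp only [stepL, popW_chainL N _ (by omega : (-1 : Int) ≤ a - 1),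
        chainL_headD N hLge]
      congr 1
      simp only [add_sub_cancel_right]
      conv_rhs => rw [chainL, dif_pos h0]
    rw [hst, leftFold N (a + 1) _ (by omega) (by omega)]
    simp [List.append_assoc]
  · have haa : a = (N.length : Int) := by omega
    subst haa
    rw [PySem.List.pyRange_one_eq_nil le_rfl]
    simp
termination_by ((N.length : Int) - a).toNat
decreasing_by omega

theorem rightFold (N : List Int) (a : Int) (acc : List Int) (h0 : -1 ≤ a)
    (h1 : a < (N.length : Int)) :
    (PySem.List.pyRange a (-1) (-1)).foldl (stepR N) (acc, chainR N (a + 1)) =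
      (acc ++ (PySem.List.pyRange a (-1) (-1)).map
          (fun i => scanR N (PySem.List.pyGetD N i 0) (i + 1)),
       chainR N 0) := by
  by_cases ha : -1 < a
  · rw [PySem.List.pyRange_neg_one_cons ha]
    simp only [List.foldl_cons, List.map_cons]
    have hRle : scanR N (PySem.List.pyGetD N a 0) (a + 1) ≤ (N.length : Int) :=
      scanR_le N _ (by omega)
    have hst : stepR N (acc, chainR N (a + 1)) a =
        (acc ++ [scanR N (PySem.List.pyGetD N a 0) (a + 1)], chainR N ((a - 1) + 1)) := by
      simp only [stepR, popW_chainR N _ (by omega : (-1 : Int) ≤ a + 1),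
        PySem.List.len_eq, chainR_headD N hRle]
      congr 1
      simp only [sub_add_cancel]
      conv_rhs => rw [chainR, dif_pos h1]
    rw [hst, rightFold N (a - 1) _ (by omega) (by omega)]
    simp [List.append_assoc]
  · have haa : a = -1 := by omega
    subst haa
    rw [PySem.List.pyRange_neg_one_eq_nil le_rfl]
    simp
termination_by (a + 1).toNat
decreasing_by omega

-- running prefix sums starting from accumulator c
def sums (c : Int) : List Int → List Int
  | [] => []
  | x :: xs => (c + x) :: sums (c + x) xs

theorem length_sums (c : Int) (xs : List Int) : (sums c xs).length = xs.length := by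
  induction xs generalizing c with
  | nil => rfl
  | cons x xs ih => simp [sums, ih]

theorem sums_getElem? (c : Int) (xs : List Int) :
    ∀ k, k < xs.length → (sums c xs)[k]? = some (c + (xs.take (k + 1)).sum) := by
  induction xs generalizing c with
  | nil => intro k hk; simp at hk
  | cons x xs ih =>
      intro k hk
      cases k with
      | zero => simp [sums]
      | succ k =>
          simp only [sums, List.getElem?_cons_succ, List.take_succ_cons, List.sum_cons]
          rw [ih (c + x) k (by simpa using hk)]
          congr 1
          ring

theorem sums_snoc (c : Int) (xs : List Int) (x : Int) :
    sums c (xs ++ [x]) = sums c xs ++ [c + xs.sum + x] := by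
  induction xs generalizing c with
  | nil => simp [sums]
  | cons y xs ih =>
      simp only [List.cons_append, sums, List.sum_cons, ih]
      congr 3
      ring

theorem preB_fold (xs : List Int) :
    ∀ (p : List Int) (c : Int),
      xs.foldl (fun p x => p ++ [PySem.List.pyGetD p (-1) 0 + x]) (p ++ [c]) =
        (p ++ [c]) ++ sums c xs := by
  induction xs with
  | nil => intro p c; simp [sums]
  | cons x xs ih =>
      intro p c
      simp only [List.foldl_cons, PySem.List.pyGetD_neg_one_append_singleton]
      have := ih (p ++ [c]) (c + x)
      simp only [List.append_assoc] at this ⊢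
      simpa [sums] using this

theorem buildPreB_eq (nums : List Int) : buildPreB nums = 0 :: sums 0 nums := by
  have := preB_fold nums [] 0
  simpa [buildPreB] using this

theorem prefA_key (N : List Int) (hN : N ≠ []) :
    ∀ (i : Nat), 1 ≤ i → i ≤ N.length →
      (PySem.List.pyRange 1 (i : Int) 1).foldl
          (fun p j => p ++ [PySem.List.pyGetD N j 0 + PySem.List.pyGetD p (j - 1) 0])
          [PySem.List.pyGetD N 0 0] = sums 0 (N.take i) := by
  intro i
  induction i with
  | zero => intro h; omega
  | succ i ih =>
      intro h1 h2
      by_cases hi : i = 0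
      · subst hi
        rw [show ((1 : Nat) : Int) = 1 by norm_num, PySem.List.pyRange_one_eq_nil le_rfl]
        obtain ⟨y, t, rfl⟩ := List.exists_cons_of_ne_nil hN
        simp [sums, PySem.List.pyGetD_zero_cons]
      · have h1' : 1 ≤ i := by omega
        have hcast : ((i + 1 : Nat) : Int) = (i : Int) + 1 := by push_cast; ring
        rw [hcast, PySem.List.pyRange_one_succ_right (by omega : (1:Int) ≤ (i:Int)),
          List.foldl_append, ih h1' (by omega)]
        simp only [List.foldl_cons, List.foldl_nil]
        have hgetN : PySem.List.pyGetD N (i : Int) 0 = N[i]'(by omega) := by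
          rw [PySem.List.pyGetD_natCast]
          exact List.getD_eq_getElem _ _ (by omega)
        have hcast2 : ((i : Int) - 1) = ((i - 1 : Nat) : Int) := by omega
        have hgetS : PySem.List.pyGetD (sums 0 (N.take i)) ((i : Int) - 1) 0 =
            (N.take i).sum := by
          rw [hcast2, PySem.List.pyGetD_natCast]
          have hlt : i - 1 < (sums 0 (N.take i)).length := by
            rw [length_sums, List.length_take]; omega
          rw [List.getD_eq_getElem _ _ hlt, ← Option.some_inj, ← List.getElem?_eq_getElem,
            sums_getElem? 0 (N.take i) (i - 1) (by rw [List.length_take]; omega)]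
          rw [show i - 1 + 1 = i from by omega]
          simp [List.take_take]
        rw [hgetN, hgetS]
        have htake : N.take (i + 1) = N.take i ++ [N[i]'(by omega)] := by
          rw [List.take_add_one]
          simp [List.getElem?_eq_getElem (by omega : i < N.length)]
        rw [htake, sums_snoc]
        congr 2
        ring

theorem buildPrefixA_eq (nums : List Int) (h : nums ≠ []) :
    buildPrefixA nums = sums 0 nums := by
  have := prefA_key nums h nums.length (by
    cases nums with
    | nil => exact absurd rfl h
    | cons a t => simp) le_rfl
  rw [List.take_length] at this
  simpa [buildPrefixA, PySem.List.len_eq] using this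

theorem getD_sums_int (N : List Int) {k : Int} (h0 : 0 ≤ k) (h1 : k < (N.length : Int)) :
    PySem.List.pyGetD (sums 0 N) k 0 = (N.take (k.toNat + 1)).sum := by
  conv_lhs => rw [show k = ((k.toNat : Nat) : Int) from by omega]
  rw [PySem.List.pyGetD_natCast]
  have hlt : k.toNat < (sums 0 N).length := by rw [length_sums]; omega
  rw [List.getD_eq_getElem _ _ hlt, ← Option.some_inj, ← List.getElem?_eq_getElem,
    sums_getElem? 0 N k.toNat (by omega)]
  simp

theorem getD_pre0_int (N : List Int) {k : Int} (h0 : 0 ≤ k) (h1 : k ≤ (N.length : Int)) :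
    PySem.List.pyGetD (0 :: sums 0 N) k 0 = (N.take k.toNat).sum := by
  by_cases hk : k = 0
  · subst hk; simp [PySem.List.pyGetD_zero_cons]
  · conv_lhs => rw [show k = ((k.toNat : Nat) : Int) from by omega]
    rw [PySem.List.pyGetD_natCast]
    conv_lhs => rw [show k.toNat = (k.toNat - 1) + 1 from by omega]
    rw [List.getD_cons_succ]
    have hlt : k.toNat - 1 < (sums 0 N).length := by rw [length_sums]; omega
    rw [List.getD_eq_getElem _ _ hlt, ← Option.some_inj, ← List.getElem?_eq_getElem,
      sums_getElem? 0 N (k.toNat - 1) (by omega)]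
    simp
    rw [show k.toNat - 1 + 1 = k.toNat from by omega]

-- ===== VERDICT (by name: the statement is the Claim_ definition above) =====
theorem maxSumMinProduct_spec : Claim_equal_maxSumMinProduct := by
  intro nums _ hpre
  unfold Spec_maxSumMinProduct
  have hn : 1 ≤ (nums.length : Int) := by
    cases nums with
    | nil => exact absurd rfl hpre
    | cons a t => simp only [List.length_cons]; omega
  have hleft : ((PySem.List.pyRange 0 (nums.length : Int) 1).foldl (stepL nums) ([], [])).1 =
      (PySem.List.pyRange 0 (nums.length : Int) 1).map
        (fun i => scanL nums (PySem.List.pyGetD nums i 0) (i - 1)) := by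
    have h2 := leftFold nums 0 [] le_rfl (by omega)
    rw [show chainL nums (0 - 1) = ([] : List Int) from by
      rw [chainL]; rw [dif_neg (by norm_num)]] at h2
    rw [h2]
    simp
  have hright : (((PySem.List.pyRange ((nums.length : Int) - 1) (-1) (-1)).foldl
        (stepR nums) ([], [])).1).reverse =
      (PySem.List.pyRange 0 (nums.length : Int) 1).map
        (fun i => scanR nums (PySem.List.pyGetD nums i 0) (i + 1)) := by
    have h2 := rightFold nums ((nums.length : Int) - 1) [] (by omega) (by omega)
    rw [show chainR nums (((nums.length : Int) - 1) + 1) = ([] : List Int) from by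
      rw [chainR]; rw [dif_neg (by omega)]] at h2
    rw [h2]
    simp only [List.nil_append]
    rw [show (PySem.List.pyRange ((nums.length : Int) - 1) (-1) (-1)) =
        (PySem.List.pyRange 0 (nums.length : Int) 1).reverse from by
      rw [PySem.List.pyRange_neg_one_eq_reverse]; norm_num]
    simp [List.map_reverse]
  simp only [maxSumMinProduct, maxSumMinProduct_alt, PySem.List.len_eq, hleft, hright,
    buildPreB_eq, buildPrefixA_eq nums hpre]
  apply PySem.List.foldl_congr_mem
  intro acc i hi
  rw [PySem.List.mem_pyRange_one] at hi
  obtain ⟨hi0, hin⟩ := hi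
  rw [PySem.List.pyGetD_map_pyRange_of_nonneg _ _ _ _ hi0 hin,
    PySem.List.pyGetD_map_pyRange_of_nonneg _ _ _ _ hi0 hin]
  simp only [getLrSum]
  have hl1 : -1 ≤ scanL nums (PySem.List.pyGetD nums i 0) (i - 1) := scanL_ge _ _ (by omega)
  have hl2 : scanL nums (PySem.List.pyGetD nums i 0) (i - 1) ≤ i - 1 := scanL_le _ _ _
  have hr1 : i + 1 ≤ scanR nums (PySem.List.pyGetD nums i 0) (i + 1) := scanR_ge _ _ _
  have hr2 : scanR nums (PySem.List.pyGetD nums i 0) (i + 1) ≤ (nums.length : Int) :=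
    scanR_le _ _ (by omega)
  rw [getD_pre0_int nums (by omega) hr2,
    getD_pre0_int nums (by omega)
      (by omega : scanL nums (PySem.List.pyGetD nums i 0) (i - 1) + 1 ≤ (nums.length : Int)),
    getD_sums_int nums (by omega)
      (by omega : scanR nums (PySem.List.pyGetD nums i 0) (i + 1) - 1 < (nums.length : Int))]
  by_cases hl : 0 ≤ scanL nums (PySem.List.pyGetD nums i 0) (i - 1)
  · rw [if_pos hl, getD_sums_int nums hl (by omega)]
    rw [show (scanR nums (PySem.List.pyGetD nums i 0) (i + 1) - 1).toNat + 1 =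
        (scanR nums (PySem.List.pyGetD nums i 0) (i + 1)).toNat from by omega,
      show (scanL nums (PySem.List.pyGetD nums i 0) (i - 1) + 1).toNat =
        (scanL nums (PySem.List.pyGetD nums i 0) (i - 1)).toNat + 1 from by omega]
  · rw [if_neg hl]
    rw [show (scanR nums (PySem.List.pyGetD nums i 0) (i + 1) - 1).toNat + 1 =
        (scanR nums (PySem.List.pyGetD nums i 0) (i + 1)).toNat from by omega,
      show (scanL nums (PySem.List.pyGetD nums i 0) (i - 1) + 1).toNat = 0 from by omega]
    simp
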